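-- pv_equiv track=rewrite | github.com/JVM8080/projetoDesSoft | funcoes.py | calcula_pontos_sequencia_baixa
-- ===== SOURCE A (Python) =====
-- def calcula_pontos_sequencia_baixa(data):
--     data_un = set(data)
--     sequencias_baixas = [
--         {1, 2, 3, 4},
--         {2, 3, 4, 5},
--         {3, 4, 5, 6}
--     ]
--
--     for seq in sequencias_baixas:
--         if seq.issubset(data_un):
--             return 15
--     return 0
-- ===== SOURCE B (Python) =====
-- def calcula_pontos_sequencia_baixa(data):
--     s = set(data) & {1, 2, 3, 4, 5, 6}
--     for v in s:
--         if v - 1 not in s: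
--             length = 1
--             while v + length in s:
--                 length += 1
--             if length >= 4:
--                 return 15
--     return 0
-- ===== Notes on version B (the rewrite author's own statement) =====
-- stated objective: alternative
-- what changed: Instead of testing the three hard-coded 4-element subsets against set(data), B intersects set(data) with {1..6} and scans for a start-of-run value whose consecutive streak reaches length 4.
import Mathlib
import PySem

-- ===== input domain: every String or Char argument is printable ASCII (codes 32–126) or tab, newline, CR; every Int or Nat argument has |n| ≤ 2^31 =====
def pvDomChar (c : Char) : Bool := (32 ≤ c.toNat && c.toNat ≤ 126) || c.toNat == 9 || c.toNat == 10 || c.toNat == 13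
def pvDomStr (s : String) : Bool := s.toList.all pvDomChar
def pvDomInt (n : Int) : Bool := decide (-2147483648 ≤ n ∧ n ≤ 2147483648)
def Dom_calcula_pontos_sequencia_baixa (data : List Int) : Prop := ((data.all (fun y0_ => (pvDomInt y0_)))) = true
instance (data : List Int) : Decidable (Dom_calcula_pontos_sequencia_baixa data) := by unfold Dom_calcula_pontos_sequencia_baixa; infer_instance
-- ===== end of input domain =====

-- B replaces A's three fixed-subset tests by a start-of-run streak scan over set(data) ∩ {1..6} (objective: alternative).

-- ===== PORT A =====
def calcula_pontos_sequencia_baixa (data : List Int) : Int :=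
  let data_un : PySem.Set Int := PySem.Set.ofList data
  -- the for-loop over the three candidate sets with early return 15, as nested ifs
  if PySem.Set.issubset ([1, 2, 3, 4] : PySem.Set Int) data_un then 15
  else if PySem.Set.issubset ([2, 3, 4, 5] : PySem.Set Int) data_un then 15
  else if PySem.Set.issubset ([3, 4, 5, 6] : PySem.Set Int) data_un then 15
  else 0

-- ===== PORT B =====
-- the while-loop 'while v + length in s: length += 1'; fuel 7 is exact: s ⊆ {1,…,6}, so the
-- membership test fails by length = 6 at the latest and the body runs at most 5 times.
def pvRunLen (s : PySem.Set Int) (v : Int) (length : Int) (fuel : Nat) : Int :=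
  match fuel with
  | 0 => length
  | fuel + 1 => if PySem.Set.contains s (v + length) then pvRunLen s v (length + 1) fuel else length

-- the for-loop over the set s with early return 15 is order-independent, ported as List.any
def calcula_pontos_sequencia_baixa_alt (data : List Int) : Int :=
  let s : PySem.Set Int := PySem.Set.inter (PySem.Set.ofList data) ([1, 2, 3, 4, 5, 6] : PySem.Set Int)
  if s.any (fun v => !(PySem.Set.contains s (v - 1)) && decide (pvRunLen s v 1 7 ≥ 4)) then 15 else 0

-- ===== PRECONDITION & SPEC =====
def Spec_calcula_pontos_sequencia_baixa (data : List Int) (out : Int) : Prop := out = calcula_pontos_sequencia_baixa_alt data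
instance (data : List Int) (out : Int) : Decidable (Spec_calcula_pontos_sequencia_baixa data out) := by unfold Spec_calcula_pontos_sequencia_baixa; infer_instance

-- ===== CLAIM (what is proved, stated in full; the proofs are below) =====
def Claim_equal_calcula_pontos_sequencia_baixa : Prop := ∀ (data : List Int), Dom_calcula_pontos_sequencia_baixa data → Spec_calcula_pontos_sequencia_baixa data (calcula_pontos_sequencia_baixa data)

-- ===== LEMMAS AND PROOFS =====

-- the set s that B builds
def pvS (data : List Int) : PySem.Set Int :=
  PySem.Set.inter (PySem.Set.ofList data) ([1, 2, 3, 4, 5, 6] : PySem.Set Int)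

-- the common "contains a low straight" condition
def pvC (data : List Int) : Prop :=
  ((1:Int) ∈ data ∧ (2:Int) ∈ data ∧ (3:Int) ∈ data ∧ (4:Int) ∈ data) ∨
  ((2:Int) ∈ data ∧ (3:Int) ∈ data ∧ (4:Int) ∈ data ∧ (5:Int) ∈ data) ∨
  ((3:Int) ∈ data ∧ (4:Int) ∈ data ∧ (5:Int) ∈ data ∧ (6:Int) ∈ data)

lemma mem_pvS (data : List Int) (v : Int) :
    v ∈ pvS data ↔ v ∈ data ∧ v ∈ ([1, 2, 3, 4, 5, 6] : List Int) := by
  simp [pvS, PySem.Set.mem_inter, PySem.Set.mem_ofList]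

lemma p1 (data : List Int) :
    ((!(PySem.Set.contains (pvS data) (1 - 1))) && decide (pvRunLen (pvS data) 1 1 7 ≥ 4)) = true ↔
      ((2:Int) ∈ data ∧ (3:Int) ∈ data ∧ (4:Int) ∈ data) := by
  by_cases h2 : (2:Int) ∈ data <;> by_cases h3 : (3:Int) ∈ data <;>
    by_cases h4 : (4:Int) ∈ data <;> by_cases h5 : (5:Int) ∈ data <;>
    by_cases h6 : (6:Int) ∈ data <;>
    simp [pvRunLen, mem_pvS, h2, h3, h4, h5, h6]

lemma p2 (data : List Int) :
    ((!(PySem.Set.contains (pvS data) (2 - 1))) && decide (pvRunLen (pvS data) 2 1 7 ≥ 4)) = true ↔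
      (¬ (1:Int) ∈ data ∧ (3:Int) ∈ data ∧ (4:Int) ∈ data ∧ (5:Int) ∈ data) := by
  by_cases h1 : (1:Int) ∈ data <;> by_cases h3 : (3:Int) ∈ data <;>
    by_cases h4 : (4:Int) ∈ data <;> by_cases h5 : (5:Int) ∈ data <;>
    by_cases h6 : (6:Int) ∈ data <;>
    simp [pvRunLen, mem_pvS, h1, h3, h4, h5, h6]

lemma p3 (data : List Int) :
    ((!(PySem.Set.contains (pvS data) (3 - 1))) && decide (pvRunLen (pvS data) 3 1 7 ≥ 4)) = true ↔
      (¬ (2:Int) ∈ data ∧ (4:Int) ∈ data ∧ (5:Int) ∈ data ∧ (6:Int) ∈ data) := by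
  by_cases h2 : (2:Int) ∈ data <;> by_cases h4 : (4:Int) ∈ data <;>
    by_cases h5 : (5:Int) ∈ data <;> by_cases h6 : (6:Int) ∈ data <;>
    simp [pvRunLen, mem_pvS, h2, h4, h5, h6]

lemma p4 (data : List Int) :
    ((!(PySem.Set.contains (pvS data) (4 - 1))) && decide (pvRunLen (pvS data) 4 1 7 ≥ 4)) = true ↔ False := by
  by_cases h3 : (3:Int) ∈ data <;> by_cases h5 : (5:Int) ∈ data <;>
    by_cases h6 : (6:Int) ∈ data <;>
    simp [pvRunLen, mem_pvS, h3, h5, h6]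

lemma p5 (data : List Int) :
    ((!(PySem.Set.contains (pvS data) (5 - 1))) && decide (pvRunLen (pvS data) 5 1 7 ≥ 4)) = true ↔ False := by
  by_cases h4 : (4:Int) ∈ data <;> by_cases h6 : (6:Int) ∈ data <;>
    simp [pvRunLen, mem_pvS, h4, h6]

lemma p6 (data : List Int) :
    ((!(PySem.Set.contains (pvS data) (6 - 1))) && decide (pvRunLen (pvS data) 6 1 7 ≥ 4)) = true ↔ False := by
  by_cases h5 : (5:Int) ∈ data <;> simp [pvRunLen, mem_pvS, h5]

lemma any_iff (data : List Int) :
    ((pvS data).any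
        (fun v => !(PySem.Set.contains (pvS data) (v - 1)) && decide (pvRunLen (pvS data) v 1 7 ≥ 4)) = true)
      ↔ pvC data := by
  rw [List.any_eq_true]
  constructor
  · rintro ⟨v, hv, hp⟩
    have hv' := (mem_pvS data v).1 hv
    obtain ⟨hvd, hv6⟩ := hv'
    have : v = 1 ∨ v = 2 ∨ v = 3 ∨ v = 4 ∨ v = 5 ∨ v = 6 := by simpa using hv6
    unfold pvC
    rcases this with rfl | rfl | rfl | rfl | rfl | rfl
    · have := (p1 data).1 hp; tauto
    · have := (p2 data).1 hp; tauto
    · have := (p3 data).1 hp; tauto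
    · exact absurd hp (by simpa using (p4 data).not.2 not_false)
    · exact absurd hp (by simpa using (p5 data).not.2 not_false)
    · exact absurd hp (by simpa using (p6 data).not.2 not_false)
  · intro hC
    by_cases h1 : (1:Int) ∈ data
    · -- if 1 ∈ data and pvC holds, then either start 1 works or start 3 works
      by_cases h2 : (2:Int) ∈ data
      · rcases hC with ⟨_, hb, hc, hd⟩ | ⟨_, hc, hd, _⟩ | ⟨hc, hd, he, hf⟩
        · exact ⟨1, (mem_pvS data 1).2 ⟨h1, by simp⟩, (p1 data).2 ⟨hb, hc, hd⟩⟩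
        · exact ⟨1, (mem_pvS data 1).2 ⟨h1, by simp⟩, (p1 data).2 ⟨h2, hc, hd⟩⟩
        · by_cases h34 : (2:Int) ∈ data ∧ (3:Int) ∈ data ∧ (4:Int) ∈ data
          · exact ⟨1, (mem_pvS data 1).2 ⟨h1, by simp⟩, (p1 data).2 ⟨h34.1, h34.2.1, h34.2.2⟩⟩
          · exact ⟨1, (mem_pvS data 1).2 ⟨h1, by simp⟩, (p1 data).2 ⟨h2, hc, hd⟩⟩
      · rcases hC with ⟨_, hb, _, _⟩ | ⟨hb, _, _, _⟩ | ⟨hc, hd, he, hf⟩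
        · exact absurd hb h2
        · exact absurd hb h2
        · exact ⟨3, (mem_pvS data 3).2 ⟨hc, by simp⟩, (p3 data).2 ⟨h2, hd, he, hf⟩⟩
    · rcases hC with ⟨ha, _, _, _⟩ | ⟨hb, hc, hd, he⟩ | ⟨hc, hd, he, hf⟩
      · exact absurd ha h1
      · exact ⟨2, (mem_pvS data 2).2 ⟨hb, by simp⟩, (p2 data).2 ⟨h1, hc, hd, he⟩⟩
      · by_cases h2 : (2:Int) ∈ data
        · exact ⟨2, (mem_pvS data 2).2 ⟨h2, by simp⟩, (p2 data).2 ⟨h1, hc, hd, he⟩⟩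
        · exact ⟨3, (mem_pvS data 3).2 ⟨hc, by simp⟩, (p3 data).2 ⟨h2, hd, he, hf⟩⟩

lemma A_pos (data : List Int) (h : pvC data) : calcula_pontos_sequencia_baixa data = 15 := by
  unfold calcula_pontos_sequencia_baixa
  dsimp only
  split_ifs with ha hb hc
  · rfl
  · rfl
  · rfl
  · exfalso
    unfold pvC at h
    simp [PySem.Set.issubset_iff, PySem.Set.mem_ofList] at ha hb hc
    tauto

lemma A_neg (data : List Int) (h : ¬ pvC data) : calcula_pontos_sequencia_baixa data = 0 := by
  unfold calcula_pontos_sequencia_baixa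
  dsimp only
  split_ifs with ha hb hc
  · exfalso; apply h; unfold pvC
    simp [PySem.Set.issubset_iff, PySem.Set.mem_ofList] at ha; tauto
  · exfalso; apply h; unfold pvC
    simp [PySem.Set.issubset_iff, PySem.Set.mem_ofList] at hb; tauto
  · exfalso; apply h; unfold pvC
    simp [PySem.Set.issubset_iff, PySem.Set.mem_ofList] at hc; tauto
  · rfl

lemma B_pos (data : List Int) (h : pvC data) : calcula_pontos_sequencia_baixa_alt data = 15 := by
  unfold calcula_pontos_sequencia_baixa_alt
  dsimp only
  split_ifs with hb
  · rfl
  · exact absurd ((any_iff data).2 h) hb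

lemma B_neg (data : List Int) (h : ¬ pvC data) : calcula_pontos_sequencia_baixa_alt data = 0 := by
  unfold calcula_pontos_sequencia_baixa_alt
  dsimp only
  split_ifs with hb
  · exact absurd ((any_iff data).1 hb) h
  · rfl

-- ===== VERDICT (by name: the statement is the Claim_ definition above) =====
theorem calcula_pontos_sequencia_baixa_spec : Claim_equal_calcula_pontos_sequencia_baixa := by
  intro data _
  unfold Spec_calcula_pontos_sequencia_baixa
  by_cases hC : pvC data
  · rw [A_pos data hC, B_pos data hC]
  · rw [A_neg data hC, B_neg data hC]
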